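-- pv_equiv track=rewrite | github.com/Emon-Khan/Programming | CP(Competetive Programming)/1.Practice/0.Online Virtual Judge/CodingNinja/MakeUniqueArray/MakeUniqueArray.py | minElementsToRemove
-- ===== SOURCE A (Python) =====
-- def minElementsToRemove(arr):
--     occurrence = {}
--     for item in arr:
--         if item in occurrence:
--             occurrence[item] += 1
--         else:
--             occurrence[item] = 1
--     return len(arr) - len(occurrence)
-- ===== SOURCE B (Python) =====
-- def minElementsToRemove(arr):
--     s = sorted(arr)
--     return sum(1 for x, y in zip(s, s[1:]) if x == y)
-- ===== Notes on version B (the rewrite author's own statement) =====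
-- stated objective: alternative
-- what changed: Replaces the hash-counter dict (len(arr) - number of distinct keys) by sort-then-scan: sort a copy and count adjacent equal pairs, which equals the same value.
import Mathlib
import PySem

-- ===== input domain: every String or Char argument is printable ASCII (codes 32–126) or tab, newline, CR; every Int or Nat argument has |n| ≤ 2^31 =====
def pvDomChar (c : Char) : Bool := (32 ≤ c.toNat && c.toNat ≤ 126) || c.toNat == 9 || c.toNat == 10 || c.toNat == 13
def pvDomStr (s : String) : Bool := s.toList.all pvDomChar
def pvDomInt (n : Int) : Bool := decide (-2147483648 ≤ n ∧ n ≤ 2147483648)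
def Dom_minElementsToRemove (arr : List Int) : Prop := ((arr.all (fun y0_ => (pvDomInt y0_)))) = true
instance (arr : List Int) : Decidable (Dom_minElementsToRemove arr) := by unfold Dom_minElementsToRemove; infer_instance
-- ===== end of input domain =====

-- B replaces A's hash-counter (len(arr) - number of distinct keys) with sort-then-scan counting
-- adjacent equal pairs; an alternative algorithm of similar cost, proved to return the same value.

-- ===== PORT A =====
def minElementsToRemove (arr : List Int) : Int :=
  let occurrence := arr.foldl
    (fun d item =>
      if d.contains item then d.insert item (d.getD item 0 + 1)
      else d.insert item 1)
    (PySem.Dict.empty : PySem.Dict Int Int)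
  (arr.length : Int) - (occurrence.size : Int)

-- ===== PORT B =====
-- s[1:] with literal start 1 ≥ 0 is exactly List.drop 1; the generator-sum is the fold below.
def minElementsToRemove_alt (arr : List Int) : Int :=
  let s := PySem.List.sorted arr (fun x => x) false
  (s.zip (s.drop 1)).foldl (fun c q => if q.1 == q.2 then c + 1 else c) 0

-- ===== PRECONDITION & SPEC =====
def Spec_minElementsToRemove (arr : List Int) (out : Int) : Prop := out = minElementsToRemove_alt arr
instance (arr : List Int) (out : Int) : Decidable (Spec_minElementsToRemove arr out) := by unfold Spec_minElementsToRemove; infer_instance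

-- ===== CLAIM (what is proved, stated in full; the proofs are below) =====
def Claim_equal_minElementsToRemove : Prop := ∀ (arr : List Int), Dom_minElementsToRemove arr → Spec_minElementsToRemove arr (minElementsToRemove arr)

-- ===== LEMMAS AND PROOFS =====

-- a nodup list has as many elements as its Finset of members; Set.ofList has the members of l
lemma ofList_length_eq_card (l : List Int) :
    (PySem.Set.ofList l).length = l.toFinset.card := by
  have hnd : (PySem.Set.ofList l).Nodup := PySem.Set.nodup_ofList l
  have hfs : (PySem.Set.ofList l).toFinset = l.toFinset := by
    ext x
    simp [List.mem_toFinset, PySem.Set.mem_ofList]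
  calc (PySem.Set.ofList l).length = (PySem.Set.ofList l).toFinset.card :=
        (List.toFinset_card_of_nodup hnd).symm
    _ = l.toFinset.card := by rw [hfs]

-- in a ≤-sorted list, adjacent equal pairs + distinct values = length
lemma adj_card : ∀ l : List Int, l.Pairwise (· ≤ ·) →
    (l.zip (l.drop 1)).countP (fun q => q.1 == q.2) + l.toFinset.card = l.length := by
  intro l
  induction l with
  | nil => intro _; simp
  | cons a t ih =>
    intro hp
    cases t with
    | nil => simp
    | cons b t' =>
      have htail : (b :: t').Pairwise (· ≤ ·) := hp.tail
      have ihv := ih htail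
      by_cases hab : a = b
      · subst hab
        have hmem : a ∈ a :: t' := List.mem_cons_self ..
        simp only [List.drop_succ_cons, List.drop_zero, List.zip_cons_cons, List.countP_cons,
          List.toFinset_cons, List.length_cons] at *
        have : insert a (insert a t'.toFinset) = insert a t'.toFinset := by
          simp
        rw [this]
        simp only [beq_self_eq_true, if_pos]
        omega
      · have hle : ∀ x ∈ b :: t', a ≤ x := by
          intro x hx
          exact (List.pairwise_cons.mp hp).1 x hx
        have hnotmem : a ∉ b :: t' := by
          intro hmem
          rcases List.mem_cons.mp hmem with h | h
          · exact hab h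
          · have hb : b ≤ a := by
              have := (List.pairwise_cons.mp htail).1 a h
              exact this
            have hab' : a ≤ b := hle b (List.mem_cons_self ..)
            exact hab (le_antisymm hab' hb)
        have hcard : (a :: b :: t').toFinset.card = (b :: t').toFinset.card + 1 := by
          simp only [List.toFinset_cons (a := a)]
          rw [Finset.card_insert_of_notMem (by simpa using hnotmem)]
        simp only [List.drop_succ_cons, List.drop_zero, List.zip_cons_cons, List.countP_cons] at *
        have hne : ((a, b).1 == (a, b).2) = false := by simpa using hab
        simp only [hne, Bool.false_eq_true, if_false]
        simp only [List.length_cons] at *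
        omega

-- A's dict loop, rewritten to a single-insert shape so keys_foldl_insert applies
lemma A_eq (arr : List Int) :
    minElementsToRemove arr = (arr.length : Int) - ((PySem.Set.ofList arr).length : Int) := by
  unfold minElementsToRemove
  have hcongr : arr.foldl
      (fun (d : PySem.Dict Int Int) item =>
        if d.contains item then d.insert item (d.getD item 0 + 1) else d.insert item 1)
      PySem.Dict.empty
    = arr.foldl
      (fun (d : PySem.Dict Int Int) item =>
        d.insert item (if d.contains item then d.getD item 0 + 1 else 1))
      PySem.Dict.empty := by
    apply PySem.List.foldl_congr_mem
    intro d x _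
    by_cases h : d.contains x <;> simp [h]
  simp only [hcongr]
  have hkeys := PySem.Dict.keys_foldl_insert arr
    (fun (d : PySem.Dict Int Int) item => if d.contains item then d.getD item 0 + 1 else 1)
    PySem.Dict.empty
  -- size = items.length = keys.length
  have hsize : ∀ d : PySem.Dict Int Int, d.size = d.keys.length := by
    intro d; simp [PySem.Dict.size, PySem.Dict.keys]
  rw [hsize, hkeys]
  simp [PySem.Set.update, PySem.Dict.keys_empty, PySem.Set.ofList]

lemma B_eq (arr : List Int) :
    minElementsToRemove_alt arr = (arr.length : Int) - ((PySem.Set.ofList arr).length : Int) := by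
  unfold minElementsToRemove_alt
  set s := PySem.List.sorted arr (fun x => x) false with hs
  have hperm : s.Perm arr := PySem.List.sorted_perm ..
  have hpair : s.Pairwise (· ≤ ·) := by
    have := PySem.List.sorted_pairwise (xs := arr) (key := fun x => x)
    simpa using this
  have hadj := adj_card s hpair
  rw [PySem.List.foldl_if_add_one (p := fun q : Int × Int => q.1 == q.2)]
  have hfs : s.toFinset = arr.toFinset := by
    ext x; simp [List.mem_toFinset, hperm.mem_iff]
  have hlen : s.length = arr.length := hperm.length_eq
  rw [ofList_length_eq_card]
  rw [hfs, hlen] at hadj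
  rw [← hadj]
  push_cast
  ring

-- ===== VERDICT (by name: the statement is the Claim_ definition above) =====
theorem minElementsToRemove_spec : Claim_equal_minElementsToRemove := by
  intro arr _
  unfold Spec_minElementsToRemove
  rw [A_eq, B_eq]
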